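-- pv_equiv track=rewrite | github.com/pbpranavk/dsa | hashing/longest_span_sum_two_bin_arrays.py | longest_span
-- ===== SOURCE A (Python) =====
-- def longest_span(arr1, arr2):
--     n = len(arr1)
--     arr = [0 for i in range(n)]
--
--     for i in range(n):
--         arr[i] = arr1[i] - arr2[i]
--
--     hm = {}
--     sum = 0
--     max_len = 0
--
--     for i in range(n):
--         sum += arr[i]
--
--         if sum == 0:
--             max_len = i + 1
--         if sum in hm:
--             max_len = max(max_len, i - hm[sum])
--         else:
--             hm[sum] = i
--
--     return max_len
-- ===== SOURCE B (Python) =====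
-- def longest_span(arr1, arr2):
--     n = len(arr1)
--     best = 0
--     for i in range(n):
--         s = 0
--         for j in range(i, n):
--             s += arr1[j] - arr2[j]
--             if s == 0:
--                 best = max(best, j - i + 1)
--     return best
-- ===== Notes on version B (the rewrite author's own statement) =====
-- stated objective: simpler
-- what changed: Replaces the prefix-sum hashmap single pass with a direct brute-force scan of every contiguous subarray of the difference array, tracking the longest zero-sum span.
import Mathlib
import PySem

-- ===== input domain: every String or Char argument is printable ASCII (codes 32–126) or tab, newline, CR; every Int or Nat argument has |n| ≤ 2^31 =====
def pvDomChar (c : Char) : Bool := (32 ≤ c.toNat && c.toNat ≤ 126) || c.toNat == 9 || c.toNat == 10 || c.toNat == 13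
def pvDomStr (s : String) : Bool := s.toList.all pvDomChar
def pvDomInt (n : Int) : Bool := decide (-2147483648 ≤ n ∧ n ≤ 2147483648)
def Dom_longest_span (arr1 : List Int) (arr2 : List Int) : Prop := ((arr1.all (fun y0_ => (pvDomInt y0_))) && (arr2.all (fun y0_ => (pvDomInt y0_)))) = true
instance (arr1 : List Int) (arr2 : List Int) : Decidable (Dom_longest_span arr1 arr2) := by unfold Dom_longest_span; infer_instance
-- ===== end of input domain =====

-- B replaces the prefix-sum hashmap single pass with a brute-force scan of every
-- contiguous subarray of the difference array (simpler to read; O(n^2) vs A's O(n)).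

-- ===== PORT A =====
-- literal transliteration of A: build the difference array by index assignment, then the
-- hashmap/prefix-sum loop.  pyGetD is used where Python indexes (in range under Pre_).
def longest_span (arr1 : List Int) (arr2 : List Int) : Int :=
  let n : Int := (arr1.length : Int)
  let arr : List Int := (PySem.List.pyRange 0 n 1).map (fun _ => (0 : Int))
  let arr : List Int := (PySem.List.pyRange 0 n 1).foldl
    (fun a i => PySem.List.pySetD a i (PySem.List.pyGetD arr1 i 0 - PySem.List.pyGetD arr2 i 0)) arr
  let st : PySem.Dict Int Int × Int × Int := (PySem.List.pyRange 0 n 1).foldl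
    (fun st i =>
      let hm := st.1
      let sum := st.2.1 + PySem.List.pyGetD arr i 0
      let max_len := if sum = 0 then i + 1 else st.2.2
      if hm.contains sum then (hm, sum, max max_len (i - hm.getD sum 0))
      else (hm.insert sum i, sum, max_len))
    (PySem.Dict.empty, 0, 0)
  st.2.2

-- ===== PORT B =====
-- literal transliteration of Source B: for each start i, an inner loop over j accumulates the
-- running sum of arr1[j]-arr2[j]; whenever it is 0 the span j-i+1 is a candidate.
def longest_span_alt (arr1 : List Int) (arr2 : List Int) : Int :=
  let n : Int := (arr1.length : Int)
  (PySem.List.pyRange 0 n 1).foldl (fun best i =>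
    ((PySem.List.pyRange i n 1).foldl (fun st j =>
        let s := st.1 + (PySem.List.pyGetD arr1 j 0 - PySem.List.pyGetD arr2 j 0)
        (s, if s = 0 then max st.2 (j - i + 1) else st.2))
      ((0 : Int), best)).2) 0

-- ===== PRECONDITION & SPEC =====
-- Pre_ excludes exactly the inputs where both Pythons raise IndexError: arr2 shorter than arr1.
def Pre_longest_span (arr1 : List Int) (arr2 : List Int) : Prop := arr1.length ≤ arr2.length
instance (arr1 : List Int) (arr2 : List Int) : Decidable (Pre_longest_span arr1 arr2) := by
  unfold Pre_longest_span; infer_instance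
def pvWitness_longest_span : List Int × List Int := ([1, 0, 1], [0, 1, 1])
def Spec_longest_span (arr1 : List Int) (arr2 : List Int) (out : Int) : Prop := out = longest_span_alt arr1 arr2
instance (arr1 : List Int) (arr2 : List Int) (out : Int) : Decidable (Spec_longest_span arr1 arr2 out) := by unfold Spec_longest_span; infer_instance

-- ===== CLAIM (what is proved, stated in full; the proofs are below) =====
def Claim_equal_longest_span : Prop := ∀ (arr1 : List Int) (arr2 : List Int), Dom_longest_span arr1 arr2 → Pre_longest_span arr1 arr2 → Spec_longest_span arr1 arr2 (longest_span arr1 arr2)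

-- ===== LEMMAS AND PROOFS =====

-- prefix sum of the first k entries of the difference array
def psum (d : List Int) (k : ℕ) : Int := (d.take k).sum

-- the prefix-sum list [psum d 0, …, psum d n]
def pref (d : List Int) : List Int := (List.range (d.length + 1)).map (psum d)

-- first index a with psum d a = psum d b
def fIdx (d : List Int) (b : ℕ) : ℕ := (PySem.List.index? (pref d) (psum d b)).getD 0

-- the common value both loops compute: running max of b - fIdx b over b ≤ i
def best (d : List Int) : ℕ → Int
  | 0 => 0
  | i + 1 => max (best d i) ((i + 1 : ℕ) - (fIdx d (i + 1) : Int))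

theorem psum_zero (d : List Int) : psum d 0 = 0 := rfl

theorem psum_succ (d : List Int) (i : ℕ) (h : i < d.length) :
    psum d (i + 1) = psum d i + d.getD i 0 := by
  unfold psum
  rw [List.take_add_one, List.sum_append]
  rw [List.getElem?_eq_getElem h]
  simp [List.getD_eq_getElem?_getD, List.getElem?_eq_getElem h]

theorem length_pref (d : List Int) : (pref d).length = d.length + 1 := by
  simp [pref]

theorem mem_pref (d : List Int) (b : ℕ) (hb : b ≤ d.length) : psum d b ∈ pref d := by
  simp only [pref, List.mem_map]
  exact ⟨b, List.mem_range.mpr (by omega), rfl⟩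

theorem pref_getElem (d : List Int) (j : ℕ) (hj : j ≤ d.length) :
    (pref d)[j]'(by rw [length_pref]; omega) = psum d j := by
  simp [pref, List.getElem_range]

-- characterisation of fIdx: least index with equal prefix sum
theorem index?_intro {α : Type} [BEq α] [LawfulBEq α] (xs : List α) (v : α) (k : ℕ)
    (hk : k < xs.length) (hv : xs[k] = v) (hmin : ∀ j (hj : j < k), xs[j]'(by omega) ≠ v) :
    PySem.List.index? xs v = some k := by
  rw [PySem.List.index?_eq_some_iff]
  refine ⟨xs.take k, xs.drop (k + 1), ?_, by simp [Nat.min_eq_left (le_of_lt hk)], ?_⟩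
  · rw [← hv]
    conv_lhs => rw [← List.take_append_drop k xs, ← List.getElem_cons_drop hk]
  · intro hmem
    obtain ⟨j, hj, hje⟩ := List.getElem_of_mem hmem
    have hjk : j < k := by simp at hj; omega
    exact hmin j hjk (by rw [← hje]; rw [List.getElem_take])

theorem fIdx_spec (d : List Int) (b : ℕ) (hb : b ≤ d.length) :
    fIdx d b ≤ b ∧ psum d (fIdx d b) = psum d b ∧
      ∀ j, j < fIdx d b → psum d j ≠ psum d b := by
  have hmem : psum d b ∈ pref d := mem_pref d b hb
  obtain ⟨k, hk⟩ := Option.isSome_iff_exists.mp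
    ((PySem.List.index?_isSome_iff (pref d) (psum d b)).mpr hmem)
  obtain ⟨hklt, hkv, hmin⟩ := PySem.List.getElem_of_index?_eq_some hk
  have hfi : fIdx d b = k := by unfold fIdx; rw [hk]; rfl
  have hkd : k ≤ d.length := by have := length_pref d; omega
  have hget := pref_getElem d
  have hkb : k ≤ b := by
    by_contra hkb
    push Not at hkb
    exact hmin b hkb (hget b hb)
  rw [hfi]
  exact ⟨hkb, by rw [← hget k hkd]; exact hkv,
    fun j hj hc => hmin j (by omega) (by rw [hget j (by omega)]; exact hc)⟩

theorem fIdx_zero (d : List Int) : fIdx d 0 = 0 := by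
  have : pref d = psum d 0 :: (List.range d.length).map (fun k => psum d (k + 1)) := by
    simp [pref, List.range_succ_eq_map, List.map_map, Function.comp]
  unfold fIdx
  rw [psum_zero] at this ⊢
  rw [this, PySem.List.index?_cons_self]
  rfl

theorem best_nonneg (d : List Int) (i : ℕ) : 0 ≤ best d i := by
  induction i with
  | zero => simp [best]
  | succ i ih => simp only [best]; exact le_trans ih (le_max_left _ _)

theorem best_le (d : List Int) (i : ℕ) (hi : i ≤ d.length) : best d i ≤ (i : Int) := by
  induction i with
  | zero => simp [best]
  | succ i ih =>
    simp only [best, max_le_iff]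
    constructor
    · exact le_trans (ih (by omega)) (by push_cast; omega)
    · have := (fIdx_spec d (i + 1) hi).1
      push_cast; omega

-- best d k dominates b - fIdx b for every b ≤ k
theorem best_ge_sub (d : List Int) (k b : ℕ) (hb : b ≤ k) :
    (b : Int) - (fIdx d b : Int) ≤ best d k := by
  induction k with
  | zero =>
    have hb0 : b = 0 := by omega
    subst hb0
    rw [fIdx_zero]
    simp [best]
  | succ k ih =>
    rcases Nat.lt_succ_iff_lt_or_eq.mp (Nat.lt_succ_of_le hb) with h | h
    · exact le_trans (ih (by omega)) (le_max_left _ _)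
    · subst h
      exact le_max_right _ _
-- find? over range: least-witness characterisation
theorem find?_range_eq_some_iff (p : ℕ → Bool) (i j : ℕ) :
    (List.range i).find? p = some j ↔ j < i ∧ p j ∧ ∀ k, k < j → ¬ p k := by
  induction i generalizing j with
  | zero => simp
  | succ i ih =>
    rw [List.range_succ, List.find?_append]
    cases hfi : (List.range i).find? p with
    | some j' =>
      simp only [Option.some_or]
      rw [ih j'] at hfi
      constructor
      · rintro ⟨rfl⟩; exact ⟨by omega, hfi.2.1, hfi.2.2⟩
      · rintro ⟨hj, hpj, hmin⟩
        obtain ⟨hj', hpj', hmin'⟩ := hfi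
        have h1 : ¬ j' < j := fun h => hmin j' h hpj'
        have h2 : ¬ j < j' := fun h => hmin' j h hpj
        have : j = j' := by omega
        simp [this]
    | none =>
      have hnone : ∀ k, k < i → ¬ p k := by
        intro k hk
        have := List.find?_eq_none.mp hfi k (List.mem_range.mpr hk)
        simpa using this
      simp only [Option.none_or, List.find?_singleton]
      constructor
      · intro h
        split at h
        · rename_i hp
          cases h
          exact ⟨by omega, hp, hnone⟩
        · cases h
      · rintro ⟨hj, hpj, hmin⟩
        have hji : j = i := by
          rcases Nat.lt_succ_iff_lt_or_eq.mp hj with h | h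
          · exact absurd hpj (hnone j h)
          · exact h
        subst hji
        simp [hpj]

theorem find?_range_eq_none_iff (p : ℕ → Bool) (i : ℕ) :
    (List.range i).find? p = none ↔ ∀ k, k < i → ¬ p k := by
  rw [List.find?_eq_none]
  constructor
  · intro h k hk; simpa using h k (List.mem_range.mpr hk)
  · intro h k hk; simpa using h k (List.mem_range.mp hk)

-- fIdx at i+1 in terms of the first j with psum (j+1) = psum (i+1)
theorem fIdx_succ_of_zero (d : List Int) (i : ℕ) (_hi : i < d.length)
    (h0 : psum d (i + 1) = 0) : fIdx d (i + 1) = 0 := by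
  have hp : pref d = psum d 0 :: (List.range d.length).map (fun k => psum d (k + 1)) := by
    simp [pref, List.range_succ_eq_map, List.map_map, Function.comp]
  unfold fIdx
  rw [hp, h0, psum_zero, PySem.List.index?_cons_self]
  rfl

theorem fIdx_succ_of_find (d : List Int) (i j : ℕ) (hi : i < d.length)
    (h0 : psum d (i + 1) ≠ 0)
    (hf : (List.range i).find? (fun j => psum d (j + 1) == psum d (i + 1)) = some j) :
    fIdx d (i + 1) = j + 1 := by
  obtain ⟨hji, hpj, hmin⟩ := (find?_range_eq_some_iff _ i j).mp hf
  have hpj' : psum d (j + 1) = psum d (i + 1) := by simpa using hpj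
  have hidx : PySem.List.index? (pref d) (psum d (i + 1)) = some (j + 1) := by
    apply index?_intro _ _ _ (by rw [length_pref]; omega)
    · rw [pref_getElem d (j + 1) (by omega)]; exact hpj'
    · intro a ha
      match a with
      | 0 =>
        rw [pref_getElem d 0 (by omega), psum_zero]
        exact fun hc => h0 hc.symm
      | a + 1 =>
        rw [pref_getElem d (a + 1) (by omega)]
        intro hc
        exact (by simpa using hmin a (by omega) : ¬ psum d (a + 1) = psum d (i + 1)) hc
  unfold fIdx
  rw [hidx]
  rfl

theorem fIdx_succ_of_none (d : List Int) (i : ℕ) (hi : i < d.length)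
    (h0 : psum d (i + 1) ≠ 0)
    (hf : (List.range i).find? (fun j => psum d (j + 1) == psum d (i + 1)) = none) :
    fIdx d (i + 1) = i + 1 := by
  have hmin := (find?_range_eq_none_iff _ i).mp hf
  have hidx : PySem.List.index? (pref d) (psum d (i + 1)) = some (i + 1) := by
    apply index?_intro _ _ _ (by rw [length_pref]; omega)
    · exact pref_getElem d (i + 1) (by omega)
    · intro a ha
      match a with
      | 0 =>
        rw [pref_getElem d 0 (by omega), psum_zero]
        exact fun hc => h0 hc.symm
      | a + 1 =>
        rw [pref_getElem d (a + 1) (by omega)]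
        intro hc
        exact (by simpa using hmin a (by omega) : ¬ psum d (a + 1) = psum d (i + 1)) hc
  unfold fIdx
  rw [hidx]
  rfl

-- ===== A-side =====

-- setting every index of a same-length list rebuilds it as a map
theorem foldl_set_range {α : Type} (f : ℕ → α) (n : ℕ) (a : List α) (ha : a.length = n) :
    (List.range n).foldl (fun l j => l.set j (f j)) a = (List.range n).map f := by
  subst ha
  suffices h : ∀ k, k ≤ a.length →
      (List.range k).foldl (fun l j => l.set j (f j)) a = (List.range k).map f ++ a.drop k by
    have := h a.length (le_refl _)
    simpa using this
  intro k hk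
  induction k with
  | zero => simp
  | succ k ihk =>
    rw [List.range_succ, List.foldl_append, List.foldl_cons, List.foldl_nil, ihk (by omega),
      List.map_append]
    have hkl : k < a.length := by omega
    have hdrop : a.drop k = a[k] :: a.drop (k + 1) := (List.getElem_cons_drop hkl).symm
    rw [hdrop, List.set_append]
    rw [if_neg (by simp)]
    have hml : (List.map f (List.range k)).length = k := by simp
    rw [hml, Nat.sub_self, List.append_assoc]
    rfl

-- the difference array built by A's first loop is zipWith (· - ·)
theorem arrA_eq (arr1 arr2 : List Int) (hle : arr1.length ≤ arr2.length) :
    (PySem.List.pyRange 0 (arr1.length : Int) 1).foldl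
      (fun a i => PySem.List.pySetD a i (PySem.List.pyGetD arr1 i 0 - PySem.List.pyGetD arr2 i 0))
      ((PySem.List.pyRange 0 (arr1.length : Int) 1).map (fun _ => (0 : Int)))
    = List.zipWith (fun x y => x - y) arr1 arr2 := by
  rw [PySem.List.pyRange_zero_natCast, List.foldl_map, List.map_map]
  rw [PySem.List.foldl_congr_mem _ _
    (fun (a : List Int) (j : ℕ) => a.set j (arr1.getD j 0 - arr2.getD j 0)) _
    (fun a j _ => by rw [PySem.List.pySetD_natCast, PySem.List.pyGetD_natCast,
      PySem.List.pyGetD_natCast])]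
  rw [foldl_set_range _ _ _ (by simp)]
  apply List.ext_getElem
  · simp [List.length_zipWith]; omega
  · intro k h1 h2
    have hk : k < arr1.length := by simp at h1; omega
    have hk2 : k < arr2.length := by omega
    simp [List.getElem_range, List.getElem_zipWith,
      List.getD_eq_getElem?_getD, List.getElem?_eq_getElem hk, List.getElem?_eq_getElem hk2]

-- A's second loop, restated over List.range with Nat indices
def stepA (d : List Int) (st : PySem.Dict Int Int × Int × Int) (j : ℕ) :
    PySem.Dict Int Int × Int × Int :=
  let hm := st.1
  let sum := st.2.1 + PySem.List.pyGetD d (j : Int) 0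
  let max_len := if sum = 0 then (j : Int) + 1 else st.2.2
  if hm.contains sum then (hm, sum, max max_len ((j : Int) - hm.getD sum 0))
  else (hm.insert sum (j : Int), sum, max_len)

-- the invariant of A's loop
theorem loopA_invariant (d : List Int) (i : ℕ) (hi : i ≤ d.length) :
    ((List.range i).foldl (stepA d) (PySem.Dict.empty, 0, 0)).2.1 = psum d i ∧
    ((List.range i).foldl (stepA d) (PySem.Dict.empty, 0, 0)).2.2 = best d i ∧
    ∀ v, ((List.range i).foldl (stepA d) (PySem.Dict.empty, 0, 0)).1.get? v =
      ((List.range i).find? (fun j => psum d (j + 1) == v)).map (fun j => (j : Int)) := by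
  induction i with
  | zero => exact ⟨rfl, rfl, fun v => by simp⟩
  | succ i ih =>
    have hi' : i < d.length := by omega
    obtain ⟨ihs, ihm, ihh⟩ := ih (by omega)
    rw [List.range_succ]
    simp only [List.foldl_append, List.foldl_cons, List.foldl_nil]
    set st := (List.range i).foldl (stepA d) ((PySem.Dict.empty : PySem.Dict Int Int), (0 : Int), (0 : Int)) with hst
    have hsum : st.2.1 + PySem.List.pyGetD d ((i : ℕ) : Int) 0 = psum d (i + 1) := by
      rw [ihs, PySem.List.pyGetD_natCast, psum_succ d i hi']
    have hbl := best_le d i (by omega)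
    have hbn := best_nonneg d i
    cases hf : (List.range i).find? (fun j => psum d (j + 1) == psum d (i + 1)) with
    | some j =>
      obtain ⟨hji, hpj, _⟩ := (find?_range_eq_some_iff _ i j).mp hf
      have hcont : st.1.contains (psum d (i + 1)) = true := by
        rw [PySem.Dict.contains_eq_isSome_get?, ihh, hf]; rfl
      have hget : st.1.getD (psum d (i + 1)) 0 = (j : Int) := by
        rw [PySem.Dict.getD_eq_get?_getD, ihh, hf]; rfl
      simp only [stepA, hsum, hcont, if_true, hget]
      refine ⟨by trivial, ?_, ?_⟩
      · by_cases h0 : psum d (i + 1) = 0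
        · rw [if_pos h0]
          have hfi0 : fIdx d (i + 1) = 0 := fIdx_succ_of_zero d i hi' h0
          simp only [best, hfi0]
          rw [max_eq_left (by omega : (i : Int) - (j : Int) ≤ (i : Int) + 1),
            max_eq_right (le_trans hbl (by push_cast; omega))]
          push_cast; ring
        · rw [if_neg h0, ihm]
          have hfij : fIdx d (i + 1) = j + 1 := fIdx_succ_of_find d i j hi' h0 hf
          simp only [best, hfij]
          congr 1
          push_cast; ring
      · intro v
        rw [List.find?_append, ihh v]
        cases hfv : (List.range i).find? (fun k => psum d (k + 1) == v) with
        | some j' => simp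
        | none =>
          have hvne : ¬ psum d (i + 1) = v := by
            intro hv
            rw [hv] at hf
            rw [hfv] at hf
            cases hf
          simp [hvne]
    | none =>
      have hcont : st.1.contains (psum d (i + 1)) = false := by
        rw [PySem.Dict.contains_eq_isSome_get?, ihh, hf]; rfl
      simp only [stepA, hsum, hcont, Bool.false_eq_true, if_false]
      refine ⟨by trivial, ?_, ?_⟩
      · by_cases h0 : psum d (i + 1) = 0
        · rw [if_pos h0]
          have hfi0 : fIdx d (i + 1) = 0 := fIdx_succ_of_zero d i hi' h0
          simp only [best, hfi0]
          rw [max_eq_right (le_trans hbl (by push_cast; omega))]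
          push_cast; ring
        · rw [if_neg h0, ihm]
          have hfii : fIdx d (i + 1) = i + 1 := fIdx_succ_of_none d i hi' h0 hf
          simp only [best, hfii]
          rw [max_eq_left (by push_cast; omega)]
      · intro v
        rw [List.find?_append, PySem.Dict.get?_insert, ihh v]
        by_cases hv : v = psum d (i + 1)
        · rw [if_pos hv, hv, hf]
          simp
        · rw [if_neg hv]
          cases hfv : (List.range i).find? (fun k => psum d (k + 1) == v) with
          | some j' => simp
          | none =>
            have : ¬ psum d (i + 1) = v := fun hc => hv hc.symm
            simp [this]

-- A's port computes best
theorem portA_eq_best (arr1 arr2 : List Int) (hle : arr1.length ≤ arr2.length) :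
    longest_span arr1 arr2 = best (List.zipWith (fun x y => x - y) arr1 arr2) arr1.length := by
  simp only [longest_span]
  rw [arrA_eq arr1 arr2 hle]
  set d := List.zipWith (fun x y => x - y) arr1 arr2 with hd
  have hdl : d.length = arr1.length := by simp [hd, List.length_zipWith]; omega
  rw [PySem.List.pyRange_zero_natCast, List.foldl_map]
  have hstep : (fun (st : PySem.Dict Int Int × Int × Int) (j : ℕ) =>
      let hm := st.1
      let sum := st.2.1 + PySem.List.pyGetD d ((j : ℕ) : Int) 0
      let max_len := if sum = 0 then ((j : ℕ) : Int) + 1 else st.2.2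
      if hm.contains sum then (hm, sum, max max_len (((j : ℕ) : Int) - hm.getD sum 0))
      else (hm.insert sum ((j : ℕ) : Int), sum, max_len)) = stepA d := rfl
  rw [hstep]
  exact (loopA_invariant d arr1.length (by omega)).2.1

-- ===== B-side =====
-- generic facts about conditional-max folds

theorem foldl_le_self {G : Int → ℕ → Int} (hle : ∀ b j, b ≤ G b j) :
    ∀ (l : List ℕ) (b : Int), b ≤ l.foldl G b := by
  intro l
  induction l with
  | nil => intro b; exact le_refl b
  | cons a t ih => intro b; exact le_trans (hle b a) (ih (G b a))

theorem foldl_ge_of_mem {G : Int → ℕ → Int} (hle : ∀ b j, b ≤ G b j)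
    {v : Int} {j : ℕ} (hv : ∀ b, v ≤ G b j) :
    ∀ (l : List ℕ) (b : Int), j ∈ l → v ≤ l.foldl G b := by
  intro l
  induction l with
  | nil => intro b h; cases h
  | cons a t ih =>
    intro b hm
    rcases List.mem_cons.mp hm with h | h
    · subst h
      exact le_trans (hv b) (foldl_le_self hle t (G b j))
    · exact ih (G b a) h

theorem foldl_eq_or {G : Int → ℕ → Int} {P : ℕ → Int → Prop}
    (hc : ∀ b j, G b j = b ∨ P j (G b j)) :
    ∀ (l : List ℕ) (b : Int), l.foldl G b = b ∨ ∃ j ∈ l, P j (l.foldl G b) := by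
  intro l
  induction l with
  | nil => intro b; exact Or.inl rfl
  | cons a t ih =>
    intro b
    rw [List.foldl_cons]
    rcases ih (G b a) with h | ⟨j, hj, hP⟩
    · rw [h]
      rcases hc b a with h' | h'
      · exact Or.inl h'
      · exact Or.inr ⟨a, List.mem_cons_self, h'⟩
    · exact Or.inr ⟨j, List.mem_cons_of_mem a hj, hP⟩

-- the pure inner-loop step of B at start i
def stepB (d : List Int) (i : ℕ) (b : Int) (j : ℕ) : Int :=
  if psum d (j + 1) = psum d i then max b ((j : Int) - (i : Int) + 1) else b

theorem stepB_le (d : List Int) (i : ℕ) : ∀ (b : Int) (j : ℕ), b ≤ stepB d i b j := by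
  intro b j
  unfold stepB
  split
  · exact le_max_left _ _
  · exact le_refl b

-- B's inner loop: the running sum is a prefix-sum difference and the best follows stepB
theorem innerB_inv (d : List Int) (i : ℕ) :
    ∀ (k m : ℕ) (b : Int), m + k ≤ d.length →
      (List.range' m k).foldl
        (fun (st : Int × Int) (j : ℕ) =>
          let s := st.1 + d.getD j 0
          (s, if s = 0 then max st.2 ((j : Int) - (i : Int) + 1) else st.2))
        (psum d m - psum d i, b)
      = (psum d (m + k) - psum d i, (List.range' m k).foldl (stepB d i) b) := by
  intro k
  induction k with
  | zero => intro m b _; simp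
  | succ k ih =>
    intro m b hmk
    rw [List.range'_succ, List.foldl_cons, List.foldl_cons]
    have hm : m < d.length := by omega
    have hs : psum d m - psum d i + d.getD m 0 = psum d (m + 1) - psum d i := by
      rw [psum_succ d m hm]; ring
    simp only [hs]
    have hcond : (psum d (m + 1) - psum d i = 0) ↔ (psum d (m + 1) = psum d i) :=
      sub_eq_zero
    have hb : (if psum d (m + 1) - psum d i = 0 then max b ((m : Int) - (i : Int) + 1) else b)
        = stepB d i b m := by
      unfold stepB
      by_cases h : psum d (m + 1) = psum d i
      · rw [if_pos (hcond.mpr h), if_pos h]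
      · rw [if_neg (fun hc => h (hcond.mp hc)), if_neg h]
    rw [hb, ih (m + 1) (stepB d i b m) (by omega),
      show m + (k + 1) = m + 1 + k by omega]

-- the whole brute-force double loop over the difference array, in pure form
def brute (d : List Int) : Int :=
  (List.range d.length).foldl
    (fun b i => (List.range' i (d.length - i)).foldl (stepB d i) b) 0

theorem brute_outer_le (d : List Int) :
    ∀ (b : Int) (i : ℕ), b ≤ (List.range' i (d.length - i)).foldl (stepB d i) b :=
  fun b i => foldl_le_self (stepB_le d i) _ b

theorem brute_nonneg (d : List Int) : 0 ≤ brute d :=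
  foldl_le_self (brute_outer_le d) _ 0

theorem brute_ge (d : List Int) (i j : ℕ) (hij : i ≤ j) (hj : j < d.length)
    (hc : psum d (j + 1) = psum d i) : (j : Int) - (i : Int) + 1 ≤ brute d := by
  apply foldl_ge_of_mem (brute_outer_le d)
    (v := (j : Int) - (i : Int) + 1) (j := i)
  · intro b
    apply foldl_ge_of_mem (stepB_le d i) (v := (j : Int) - (i : Int) + 1) (j := j)
    · intro b'
      unfold stepB
      rw [if_pos hc]
      exact le_max_right _ _
    · exact List.mem_range'_1.mpr ⟨hij, by omega⟩
  · exact List.mem_range.mpr (by omega)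

theorem brute_cases (d : List Int) :
    brute d = 0 ∨ ∃ i j : ℕ, i ≤ j ∧ j < d.length ∧ psum d (j + 1) = psum d i ∧
      brute d = (j : Int) - (i : Int) + 1 := by
  have houter := foldl_eq_or
    (G := fun b i => (List.range' i (d.length - i)).foldl (stepB d i) b)
    (P := fun i x => ∃ j : ℕ, i ≤ j ∧ j < d.length ∧ psum d (j + 1) = psum d i ∧
      x = (j : Int) - (i : Int) + 1)
    (fun b i => by
      rcases foldl_eq_or (G := stepB d i)
        (P := fun j x => psum d (j + 1) = psum d i ∧ x = (j : Int) - (i : Int) + 1)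
        (fun b' j => by
          unfold stepB
          split
          · rename_i h
            rcases max_choice b' ((j : Int) - (i : Int) + 1) with h' | h'
            · exact Or.inl h'
            · exact Or.inr ⟨h, h'⟩
          · exact Or.inl rfl)
        (List.range' i (d.length - i)) b with h | ⟨j, hj, hcond, hx⟩
      · exact Or.inl h
      · obtain ⟨h1, h2⟩ := List.mem_range'_1.mp hj
        exact Or.inr ⟨j, h1, by omega, hcond, hx⟩)
    (List.range d.length) 0
  rcases houter with h | ⟨i, _, j, h1, h2, h3, h4⟩
  · exact Or.inl h
  · exact Or.inr ⟨i, j, h1, h2, h3, h4⟩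

-- best d k is 0 or achieved at some endpoint b
theorem best_cases (d : List Int) (k : ℕ) :
    best d k = 0 ∨ ∃ b : ℕ, 1 ≤ b ∧ b ≤ k ∧ best d k = ((b : ℕ) : Int) - (fIdx d b : Int) := by
  induction k with
  | zero => exact Or.inl rfl
  | succ k ih =>
    simp only [best]
    rcases max_choice (best d k) (((k + 1 : ℕ) : Int) - (fIdx d (k + 1) : Int)) with h | h
    · rw [h]
      rcases ih with h' | ⟨b, hb1, hb2, hb3⟩
      · exact Or.inl h'
      · exact Or.inr ⟨b, hb1, by omega, hb3⟩
    · exact Or.inr ⟨k + 1, by omega, le_refl _, h⟩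

-- the heart of the equivalence: the brute-force max equals the fIdx-based max
theorem brute_eq_best (d : List Int) : brute d = best d d.length := by
  apply le_antisymm
  · rcases brute_cases d with h | ⟨i, j, hij, hj, hc, hval⟩
    · rw [h]; exact best_nonneg d _
    · rw [hval]
      have hspec := fIdx_spec d (j + 1) (by omega)
      have hfle : fIdx d (j + 1) ≤ i := by
        by_contra hlt
        exact hspec.2.2 i (by omega) hc.symm
      calc (j : Int) - (i : Int) + 1
          ≤ ((j + 1 : ℕ) : Int) - (fIdx d (j + 1) : Int) := by push_cast; omega
        _ ≤ best d d.length := best_ge_sub d d.length (j + 1) (by omega)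
  · rcases best_cases d d.length with h | ⟨b, hb1, hbn, hval⟩
    · rw [h]; exact brute_nonneg d
    · rw [hval]
      have hspec := fIdx_spec d b (by omega)
      by_cases hfb : fIdx d b = b
      · rw [hfb]
        simpa using brute_nonneg d
      · have hflt : fIdx d b < b := lt_of_le_of_ne hspec.1 hfb
        have := brute_ge d (fIdx d b) (b - 1) (by omega) (by omega)
          (by rw [show b - 1 + 1 = b by omega]; exact hspec.2.1.symm)
        calc ((b : ℕ) : Int) - (fIdx d b : Int)
            = ((b - 1 : ℕ) : Int) - (fIdx d b : Int) + 1 := by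
              have : ((b - 1 : ℕ) : Int) = (b : Int) - 1 := by push_cast [hb1]; ring
              rw [this]; ring
          _ ≤ brute d := this

-- B's port computes brute
theorem portB_eq_brute (arr1 arr2 : List Int) (hle : arr1.length ≤ arr2.length) :
    longest_span_alt arr1 arr2 = brute (List.zipWith (fun x y => x - y) arr1 arr2) := by
  simp only [longest_span_alt, brute]
  set d := List.zipWith (fun x y => x - y) arr1 arr2 with hd
  have hdl : d.length = arr1.length := by simp [hd, List.length_zipWith]; omega
  rw [PySem.List.pyRange_zero_natCast, List.foldl_map, ← hdl]
  have houter : ∀ (b : Int) (i : ℕ), i ∈ List.range d.length →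
      ((PySem.List.pyRange ((i : ℕ) : Int) ((d.length : ℕ) : Int) 1).foldl
        (fun (st : Int × Int) j =>
          let s := st.1 + (PySem.List.pyGetD arr1 j 0 - PySem.List.pyGetD arr2 j 0)
          (s, if s = 0 then max st.2 (j - ((i : ℕ) : Int) + 1) else st.2))
        ((0 : Int), b)).2
      = (List.range' i (d.length - i)).foldl (stepB d i) b := by
    intro b i hi
    have hin : i < d.length := List.mem_range.mp hi
    -- inner pyRange over Int indices → range' over Nat indices
    have hrange : PySem.List.pyRange ((i : ℕ) : Int) ((d.length : ℕ) : Int) 1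
        = (List.range' i (d.length - i)).map (fun (j : ℕ) => (j : Int)) := by
      rw [PySem.List.pyRange_one]
      rw [List.range'_eq_map_range]
      rw [List.map_map]
      have hcnt : (((d.length : ℕ) : Int) - ((i : ℕ) : Int)).toNat = d.length - i := by omega
      rw [hcnt]
      apply List.map_congr_left
      intro k _
      simp [Function.comp]
    rw [hrange, List.foldl_map]
    -- replace the Python indexing step by the pure step, then apply the invariant
    have hcong : ∀ (st : Int × Int) (j : ℕ), j ∈ List.range' i (d.length - i) →
        (let s := st.1 + (PySem.List.pyGetD arr1 ((j : ℕ) : Int) 0 -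
          PySem.List.pyGetD arr2 ((j : ℕ) : Int) 0)
         ((s, if s = 0 then max st.2 (((j : ℕ) : Int) - ((i : ℕ) : Int) + 1) else st.2) : Int × Int))
        = (let s := st.1 + d.getD j 0
           (s, if s = 0 then max st.2 ((j : Int) - (i : Int) + 1) else st.2)) := by
      intro st j hj
      obtain ⟨h1, h2⟩ := List.mem_range'_1.mp hj
      have hj1 : j < arr1.length := by omega
      have hj2 : j < arr2.length := by omega
      have : d.getD j 0 = arr1.getD j 0 - arr2.getD j 0 := by
        simp [hd, List.getD_eq_getElem?_getD, List.getElem?_zipWith,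
          List.getElem?_eq_getElem hj1, List.getElem?_eq_getElem hj2]
      rw [PySem.List.pyGetD_natCast, PySem.List.pyGetD_natCast, this]
    rw [PySem.List.foldl_congr_mem _ _ _ _ hcong]
    have := innerB_inv d i (d.length - i) i b (by omega)
    rw [show psum d i - psum d i = 0 by ring] at this
    rw [this]
  exact PySem.List.foldl_congr_mem _ _ _ _ houter

-- ===== VERDICT (by name: the statement is the Claim_ definition above) =====
theorem longest_span_spec : Claim_equal_longest_span := by
  intro arr1 arr2 _ hpre
  unfold Pre_longest_span at hpre
  unfold Spec_longest_span
  rw [portA_eq_best arr1 arr2 hpre, portB_eq_brute arr1 arr2 hpre,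
    brute_eq_best]
  congr 1
  simp [List.length_zipWith]
  omega
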